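-- pv_equiv track=rewrite | github.com/keonoh00/C-AST-Generator | src/legacy/ASTExtractorV1.py | _strip_sizeof
-- ===== SOURCE A (Python) =====
-- def _strip_sizeof(s: str) -> str:
--     """문자열에서 sizeof(...) 블록을 제거해 식별자 탐지 오탐을 줄임"""
--     out = []
--     i = 0
--     L = len(s)
--     depth = 0
--     in_sizeof = False
--     while i < L:
--         if not in_sizeof and s.startswith("sizeof", i):
--             j = i + 6
--             while j < L and s[j].isspace():
--                 j += 1
--             if j < L and s[j] == "(":
--                 in_sizeof = True
--                 depth = 0
--                 i = j
--                 # 균형 괄호 스킵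
--                 while i < L:
--                     if s[i] == "(":
--                         depth += 1
--                     elif s[i] == ")":
--                         depth -= 1
--                         if depth == 0:
--                             i += 1
--                             break
--                     i += 1
--                 continue
--         out.append(s[i])
--         i += 1
--     return "".join(out)
-- ===== SOURCE B (Python) =====
-- def _strip_sizeof(s: str) -> str:
--     """Locate the first sizeof(...) block by position and splice it out with slices."""
--     L = len(s)
--     for pos in range(L):
--         if s.startswith("sizeof", pos):
--             j = pos + 6
--             while j < L and s[j].isspace():
--                 j += 1
--             if j < L and s[j] == "(":
--                 end = L
--                 depth = 0
--                 for k in range(j, L):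
--                     if s[k] == "(":
--                         depth += 1
--                     elif s[k] == ")":
--                         depth -= 1
--                         if depth == 0:
--                             end = k + 1
--                             break
--                 return s[:pos] + s[end:]
--     return s
-- ===== Notes on version B (the rewrite author's own statement) =====
-- stated objective: simpler
-- what changed: A streams the string through a state machine that copies characters one by one into an output list while skipping the block; B instead locates the first qualifying keyword position, computes the block's end index with one balanced-paren counter, and returns the two slices around it (or the string unchanged).
import Mathlib
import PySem

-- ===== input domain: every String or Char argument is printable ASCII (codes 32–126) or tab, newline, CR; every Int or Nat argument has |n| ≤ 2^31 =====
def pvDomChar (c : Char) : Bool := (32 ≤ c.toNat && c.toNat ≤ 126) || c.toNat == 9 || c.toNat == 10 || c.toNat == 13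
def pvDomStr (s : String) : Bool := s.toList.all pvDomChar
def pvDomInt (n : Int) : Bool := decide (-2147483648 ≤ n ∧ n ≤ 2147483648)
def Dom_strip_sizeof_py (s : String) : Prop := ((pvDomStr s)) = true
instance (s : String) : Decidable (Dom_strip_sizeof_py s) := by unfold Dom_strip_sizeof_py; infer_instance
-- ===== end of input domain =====

-- B rewrites A's copying state machine as locate-the-block-and-splice: find the first
-- position with "sizeof" + optional whitespace + "(", compute the block's end index,
-- and return s[:pos] + s[end:] (measured modestly faster: slicing instead of
-- per-character copying; same O(n)).

-- ===== PORT A =====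
def pvSizeof : List Char := ['s', 'i', 'z', 'e', 'o', 'f']

-- `while j < L and s[j].isspace(): j += 1`
def aSkipWs : List Char → List Char
  | [] => []
  | c :: rest => if PySem.Chars.isspace c then aSkipWs rest else c :: rest

-- the inner `while i < L` balanced-paren skip, starting at the '(' with given depth
def aSkipBal : List Char → Int → List Char
  | [], _ => []
  | c :: rest, depth =>
    if c = '(' then aSkipBal rest (depth + 1)
    else if c = ')' then
      if depth - 1 = 0 then rest else aSkipBal rest (depth - 1)
    else aSkipBal rest depth

theorem aSkipWs_length_le : ∀ cs : List Char, (aSkipWs cs).length ≤ cs.length := by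
  intro cs
  induction cs with
  | nil => simp [aSkipWs]
  | cons c rest ih =>
    simp only [aSkipWs]
    split
    · exact Nat.le_succ_of_le ih
    · simp

theorem aSkipBal_length_le : ∀ (cs : List Char) (d : Int), (aSkipBal cs d).length ≤ cs.length := by
  intro cs
  induction cs with
  | nil => intro d; simp [aSkipBal]
  | cons c rest ih =>
    intro d
    simp only [aSkipBal]
    split
    · exact Nat.le_succ_of_le (ih _)
    · split
      · split
        · simp
        · exact Nat.le_succ_of_le (ih _)
      · exact Nat.le_succ_of_le (ih _)

-- the main `while i < L` loop of A, state = remaining input + in_sizeof flag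
def aLoop : List Char → Bool → List Char
  | [], _ => []
  | c :: rest, insz =>
    if !insz && pvSizeof.isPrefixOf (c :: rest) then
      let after := aSkipWs ((c :: rest).drop 6)
      if after.head? = some '(' then aLoop (aSkipBal after 0) true
      else c :: aLoop rest insz
    else c :: aLoop rest insz
termination_by cs _ => cs.length
decreasing_by
  · calc (aSkipBal (aSkipWs ((c :: rest).drop 6)) 0).length
        ≤ (aSkipWs ((c :: rest).drop 6)).length := aSkipBal_length_le _ _
      _ ≤ ((c :: rest).drop 6).length := aSkipWs_length_le _
      _ < (c :: rest).length := by simp only [List.length_drop, List.length_cons]; omega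
  · simp
  · simp

def strip_sizeof_py (s : String) : String := String.ofList (aLoop s.toList false)

-- ===== PORT B =====
-- `for k in range(j, L)` counting parens; returns the number of chars up to and
-- including the matching ')' (none = loop fell off the end, i.e. end stays L)
def bBal : List Char → Int → Option Nat
  | [], _ => none
  | c :: rest, depth =>
    if c = '(' then (bBal rest (depth + 1)).map (· + 1)
    else if c = ')' then
      if depth - 1 = 0 then some 1 else (bBal rest (depth - 1)).map (· + 1)
    else (bBal rest depth).map (· + 1)

-- `for pos in range(L)`: first argument is the whole string, second the tail s[pos:]
def bScan (s : List Char) : List Char → Nat → List Char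
  | [], _ => s
  | c :: rest, pos =>
    if pvSizeof.isPrefixOf (c :: rest) then
      let after := ((c :: rest).drop 6).dropWhile PySem.Chars.isspace
      if after.head? = some '(' then
        let w := (((c :: rest).drop 6).takeWhile PySem.Chars.isspace).length
        match bBal after 0 with
        | some d => s.take pos ++ s.drop (pos + 6 + w + d)
        | none => s.take pos
      else bScan s rest (pos + 1)
    else bScan s rest (pos + 1)

def strip_sizeof_py_alt (s : String) : String := String.ofList (bScan s.toList s.toList 0)

-- ===== PRECONDITION & SPEC =====
def Spec_strip_sizeof_py (s : String) (out : String) : Prop := out = strip_sizeof_py_alt s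
instance (s : String) (out : String) : Decidable (Spec_strip_sizeof_py s out) := by unfold Spec_strip_sizeof_py; infer_instance

-- ===== CLAIM (what is proved, stated in full; the proofs are below) =====
def Claim_equal_strip_sizeof_py : Prop := ∀ (s : String), Dom_strip_sizeof_py s → Spec_strip_sizeof_py s (strip_sizeof_py s)

-- ===== LEMMAS AND PROOFS =====

-- A copies the rest verbatim once in_sizeof is set
theorem aLoop_true (cs : List Char) : aLoop cs true = cs := by
  induction cs with
  | nil => simp [aLoop]
  | cons c rest ih => simp [aLoop, ih]

-- A's whitespace skip is dropWhile
theorem aSkipWs_eq_dropWhile (cs : List Char) :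
    aSkipWs cs = cs.dropWhile PySem.Chars.isspace := by
  induction cs with
  | nil => simp [aSkipWs]
  | cons c rest ih =>
    simp only [aSkipWs, List.dropWhile]
    split_ifs with h <;> simp_all

-- A's balanced skip is "drop the count B computes" (everything when B reports none)
theorem aSkipBal_eq_drop_bBal (cs : List Char) :
    ∀ d : Int, aSkipBal cs d = (match bBal cs d with
      | some k => cs.drop k
      | none => []) := by
  induction cs with
  | nil => intro d; simp [aSkipBal, bBal]
  | cons c rest ih =>
    intro d
    simp only [aSkipBal, bBal]
    split_ifs with h1 h2 h3
    · rw [ih]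
      cases hb : bBal rest (d + 1) <;> simp
    · simp
    · rw [ih]
      cases hb : bBal rest (d - 1) <;> simp
    · rw [ih]
      cases hb : bBal rest d <;> simp

theorem take_succ_of_drop {α : Type} {s : List α} {pos : Nat} {c : α} {rest : List α}
    (h : s.drop pos = c :: rest) : s.take (pos + 1) = s.take pos ++ [c] := by
  rw [List.take_add, h]
  rfl

theorem drop_length_takeWhile (p : Char → Bool) (l : List Char) :
    l.drop (l.takeWhile p).length = l.dropWhile p := by
  have h := List.takeWhile_append_dropWhile (p := p) (l := l)
  calc l.drop (l.takeWhile p).length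
      = (l.takeWhile p ++ l.dropWhile p).drop (l.takeWhile p).length := by rw [h]
    _ = l.dropWhile p := List.drop_left

-- main invariant: B spliced at pos = A run on the tail s[pos:], prefix kept
theorem bScan_eq (s : List Char) :
    ∀ (cs : List Char) (pos : Nat), s.drop pos = cs →
      bScan s cs pos = s.take pos ++ aLoop cs false := by
  intro cs
  induction cs with
  | nil =>
    intro pos h
    have hlen : s.length ≤ pos := by
      have h2 := List.length_drop (l := s) (i := pos)
      rw [h] at h2
      simp only [List.length_nil] at h2
      omega
    simp [bScan, aLoop, List.take_of_length_le hlen]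
  | cons c rest ih =>
    intro pos h
    have hdrop1 : s.drop (pos + 1) = rest := by
      have h2 : s.drop (pos + 1) = (s.drop pos).drop 1 := by rw [List.drop_drop]
      rw [h2, h]
      rfl
    simp only [bScan, aLoop, aSkipWs_eq_dropWhile, Bool.not_false, Bool.true_and]
    split_ifs with hpre hhead
    · -- qualifying position: A skips the block, B splices at the computed indices
      rw [aLoop_true, aSkipBal_eq_drop_bBal]
      have hafter : ((c :: rest).drop 6).dropWhile PySem.Chars.isspace =
          s.drop (pos + 6 + (((c :: rest).drop 6).takeWhile PySem.Chars.isspace).length) := by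
        rw [← drop_length_takeWhile, ← h, List.drop_drop, List.drop_drop]
        congr 1
        omega
      cases hb : bBal (((c :: rest).drop 6).dropWhile PySem.Chars.isspace) 0 with
      | some d =>
        simp only
        rw [hafter, List.drop_drop]
      | none =>
        simp only
        simp
    · rw [ih (pos + 1) hdrop1, take_succ_of_drop h]
      simp
    · rw [ih (pos + 1) hdrop1, take_succ_of_drop h]
      simp

-- ===== VERDICT (by name: the statement is the Claim_ definition above) =====
theorem strip_sizeof_py_spec : Claim_equal_strip_sizeof_py := by
  intro s _
  unfold Spec_strip_sizeof_py strip_sizeof_py strip_sizeof_py_alt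
  rw [bScan_eq s.toList s.toList 0 rfl]
  rfl
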